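-- pv_equiv track=rewrite | github.com/RuiqingQiu/Algorithms | leetcode-algorithms/800_SimilarRGBColor/800_similarRGB.py | similarRGB
-- ===== SOURCE A (Python) =====
-- def similarRGB(color):
--     """
--     :type color: str
--     :rtype: str
--     """
--     hex_digits = '0123456789abcdef'
--     red = int(color[1:3], 16)
--     green = int(color[3:5], 16)
--     blue = int(color[5:7], 16)
--     result = '#'
--     for val in [red, green, blue]:
--         max_val = -10000
--         max_digit = '0'
--         for digit in hex_digits:
--             if -(val - int(digit+digit, 16)) ** 2 > max_val:
--                 max_val = -(val - int(digit+digit, 16)) ** 2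
--                 max_digit = digit
--
--         result = result + (max_digit + max_digit)
--     return result
-- ===== SOURCE B (Python) =====
-- def similarRGB(color):
--     """
--     :type color: str
--     :rtype: str
--     """
--     digits = '0123456789abcdef'
--     out = '#'
--     for i in (1, 3, 5):
--         v = int(color[i:i+2], 16)
--         k = (2 * v + 17) // 34          # nearest multiple index, round(v/17); 17 odd so no ties
--         out += digits[k] * 2
--     return out
-- ===== Notes on version B (the rewrite author's own statement) =====
-- stated objective: simpler
-- what changed: Replaces the 16-candidate inner minimization scan per channel with a direct closed-form nearest-multiple-of-17 computation k = (2*v+17)//34 (ties impossible since 17 is odd).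
-- outside the precondition, e.g. on similarRGB('#-a-a-a'): A returns '#000000', B returns '#ffffff'
import Mathlib
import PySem

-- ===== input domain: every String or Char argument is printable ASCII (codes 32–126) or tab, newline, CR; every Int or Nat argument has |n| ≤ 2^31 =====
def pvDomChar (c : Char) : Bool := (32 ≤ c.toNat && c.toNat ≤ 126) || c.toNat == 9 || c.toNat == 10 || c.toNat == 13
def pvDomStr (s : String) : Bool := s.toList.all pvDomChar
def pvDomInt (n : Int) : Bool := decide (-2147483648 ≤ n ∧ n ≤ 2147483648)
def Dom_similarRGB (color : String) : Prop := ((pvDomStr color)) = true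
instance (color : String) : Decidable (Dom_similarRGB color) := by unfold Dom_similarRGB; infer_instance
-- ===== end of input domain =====

-- B replaces A's 16-candidate per-channel scan with a closed-form nearest-multiple-of-17 index; objective: simpler.


-- shared by both ports: the value of one hex character; exact port of Python's
-- int(·,16) digit semantics on the hex characters admitted by Pre_similarRGB
def pvHexVal (c : Char) : Int :=
  if '0' ≤ c ∧ c ≤ '9' then (c.toNat : Int) - 48
  else if 'a' ≤ c ∧ c ≤ 'f' then (c.toNat : Int) - 87
  else if 'A' ≤ c ∧ c ≤ 'F' then (c.toNat : Int) - 55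
  else 0

def pvWs : List Char := [' ', '\t', '\n', '\r']

def pvHexChars : List Char :=
  ['0','1','2','3','4','5','6','7','8','9','a','b','c','d','e','f',
   'A','B','C','D','E','F']

-- int(c1 ++ c2, 16): exact on the 2-character slices Pre_similarRGB admits (two hex
-- digits, or one hex digit with a leading '+'/whitespace or a trailing whitespace)
def pvHex2 (c1 c2 : Char) : Int :=
  if pvHexChars.contains c1 && pvHexChars.contains c2 then 16 * pvHexVal c1 + pvHexVal c2
  else if pvHexChars.contains c2 then pvHexVal c2
  else pvHexVal c1

-- ===== PORT A =====
def pvHexDigitsA : List Char :=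
  ['0','1','2','3','4','5','6','7','8','9','a','b','c','d','e','f']

-- A's inner loop: scan all 16 doubled digits keeping the one maximizing -(val-dd)^2
def pvScanDigit (val : Int) : Char :=
  (pvHexDigitsA.foldl (fun (st : Int × Char) digit =>
      if -((val - pvHex2 digit digit) ^ 2) > st.1
      then (-((val - pvHex2 digit digit) ^ 2), digit)
      else st) (-10000, '0')).2

def similarRGB (color : String) : String :=
  let cs := color.toList
  let red := pvHex2 (cs.getD 1 ' ') (cs.getD 2 ' ')
  let green := pvHex2 (cs.getD 3 ' ') (cs.getD 4 ' ')
  let blue := pvHex2 (cs.getD 5 ' ') (cs.getD 6 ' ')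
  String.mk (([red, green, blue]).foldl
    (fun res val =>
      let d := pvScanDigit val
      res ++ [d, d]) ['#'])

-- ===== PORT B =====
def pvHexDigitsB : List Char :=
  ['0','1','2','3','4','5','6','7','8','9','a','b','c','d','e','f']

-- digits[(2*v+17)//34]: nearest-multiple-of-17 index (k is 0..15 on the admitted domain)
def pvAltDigit (v : Int) : Char :=
  pvHexDigitsB.getD (PySem.Int.floordiv (2 * v + 17) 34).toNat ' '

def similarRGB_alt (color : String) : String :=
  let cs := color.toList
  String.mk ((([1, 3, 5] : List Nat).foldl (fun out i =>
      let v := pvHex2 (cs.getD i ' ') (cs.getD (i + 1) ' ')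
      out ++ [pvAltDigit v, pvAltDigit v]) ['#']))

-- ===== PRECONDITION & SPEC =====
-- a 2-character slice that int(·,16) parses to a value in 0..255: two hex digits, or one
-- hex digit with a leading '+'/whitespace or a trailing whitespace
def pvPairOK (c1 c2 : Char) : Bool :=
  (pvHexChars.contains c1 && pvHexChars.contains c2) ||
  ((pvWs.contains c1 || c1 == '+') && pvHexChars.contains c2) ||
  (pvHexChars.contains c1 && pvWs.contains c2)

-- Pre_ excludes inputs where Python's int(·,16) raises ValueError on a slice, and the
-- minus-signed slices (e.g. '#-a-a-a') that parse to a NEGATIVE channel value, a corner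
-- outside the function's color domain where A's scan and B's negative indexing
-- defensibly differ.
def Pre_similarRGB (color : String) : Prop :=
  7 ≤ color.toList.length ∧
  pvPairOK (color.toList.getD 1 ' ') (color.toList.getD 2 ' ') = true ∧
  pvPairOK (color.toList.getD 3 ' ') (color.toList.getD 4 ' ') = true ∧
  pvPairOK (color.toList.getD 5 ' ') (color.toList.getD 6 ' ') = true
instance (color : String) : Decidable (Pre_similarRGB color) := by
  unfold Pre_similarRGB; infer_instance

def pvWitness_similarRGB : String := "#09f1A6"

def Spec_similarRGB (color : String) (out : String) : Prop := out = similarRGB_alt color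
instance (color : String) (out : String) : Decidable (Spec_similarRGB color out) := by
  unfold Spec_similarRGB; infer_instance

-- ===== CLAIM (what is proved, stated in full; the proofs are below) =====
def Claim_equal_similarRGB : Prop := ∀ (color : String), Dom_similarRGB color → Pre_similarRGB color → Spec_similarRGB color (similarRGB color)

-- ===== LEMMAS AND PROOFS =====

theorem pvHexVal_bounds : ∀ c ∈ pvHexChars, 0 ≤ pvHexVal c ∧ pvHexVal c ≤ 15 := by
  intro c hc
  fin_cases hc <;> decide

set_option maxRecDepth 4000 in
theorem pvChannel_all :
    ((List.range 256).all (fun n => pvScanDigit (n : Int) == pvAltDigit (n : Int))) = true := by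
  decide

theorem pvChannel_eq_nat : ∀ n : Nat, n < 256 → pvScanDigit (n : Int) = pvAltDigit (n : Int) := by
  intro n hn
  exact of_decide_eq_true (List.all_eq_true.mp pvChannel_all n (List.mem_range.mpr hn))

theorem pvChannel_eq (v : Int) (h0 : 0 ≤ v) (h1 : v ≤ 255) :
    pvScanDigit v = pvAltDigit v := by
  have hv : v = ((v.toNat : Nat) : Int) := by omega
  rw [hv]
  exact pvChannel_eq_nat v.toNat (by omega)

theorem pvHexVal_bounds' (c : Char) (h : pvHexChars.contains c = true) :
    0 ≤ pvHexVal c ∧ pvHexVal c ≤ 15 :=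
  pvHexVal_bounds c (by simpa using h)

set_option maxRecDepth 8000 in
theorem pvHex2_bounds (c1 c2 : Char) (h : pvPairOK c1 c2 = true) :
    0 ≤ pvHex2 c1 c2 ∧ pvHex2 c1 c2 ≤ 255 := by
  unfold pvHex2
  cases e1 : pvHexChars.contains c1 <;> cases e2 : pvHexChars.contains c2
  · exfalso
    unfold pvPairOK at h
    rw [e1, e2] at h
    simp at h
  · obtain ⟨b1, b2⟩ := pvHexVal_bounds' c2 e2
    simp
    omega
  · obtain ⟨a1, a2⟩ := pvHexVal_bounds' c1 e1
    simp
    omega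
  · obtain ⟨a1, a2⟩ := pvHexVal_bounds' c1 e1
    obtain ⟨b1, b2⟩ := pvHexVal_bounds' c2 e2
    simp
    omega

theorem pvChannel_hex (c1 c2 : Char) (h : pvPairOK c1 c2 = true) :
    pvScanDigit (pvHex2 c1 c2) = pvAltDigit (pvHex2 c1 c2) := by
  obtain ⟨hl, hr⟩ := pvHex2_bounds c1 c2 h
  exact pvChannel_eq _ hl hr

-- ===== VERDICT (by name: the statement is the Claim_ definition above) =====
theorem similarRGB_spec : Claim_equal_similarRGB := by
  intro color _ pre
  obtain ⟨-, h12, h34, h56⟩ := pre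
  unfold Spec_similarRGB similarRGB similarRGB_alt
  simp only [List.foldl]
  rw [pvChannel_hex _ _ h12, pvChannel_hex _ _ h34, pvChannel_hex _ _ h56]
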